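-- pv_equiv track=rewrite | github.com/SneikF/aoc | 2025/05-1.py | ingredientsInRange
-- ===== SOURCE A (Python) =====
-- def ingredientsInRange(ingredientList, left, right):
--     left = max(left, ingredientList[0])
--     right = min(right, ingredientList[-1])
--
--     if left > right:
--         return set([])
--
--     _, leftLimitIndex = indexFind(ingredientList, left, 0, len(ingredientList))
--     rightLimitIndex, _ = indexFind(ingredientList, right, 0, len(ingredientList))
--
--     res = set(ingredientList[i] for i in range(leftLimitIndex, rightLimitIndex+1))
--
--     return res
--
-- def indexFind(list, value, leftLimitIndex, rightLimitIndex):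
--     middle = (leftLimitIndex + rightLimitIndex) // 2
--
--     if leftLimitIndex + 1 == rightLimitIndex:
--         return leftLimitIndex, rightLimitIndex
--
--     if value < list[middle]:
--         return indexFind(list, value, leftLimitIndex, middle)
--     elif list[middle] == value:
--         return middle, middle
--     else: # value > list[middle]
--         return indexFind(list, value, middle, rightLimitIndex)
-- ===== SOURCE B (Python) =====
-- def ingredientsInRange(ingredientList, left, right):
--     left = max(left, ingredientList[0])
--     right = min(right, ingredientList[-1])
--
--     if left > right:
--         return set()
--
--     i = _upperIndex(ingredientList, left)
--     j = _lowerIndex(ingredientList, right)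
--     return set(ingredientList[i:j+1])
--
-- def _upperIndex(L, value):
--     # iterative binary search; returns the second component of A's indexFind
--     lo, hi = 0, len(L)
--     while lo + 1 != hi:
--         mid = (lo + hi) // 2
--         if value < L[mid]:
--             hi = mid
--         elif L[mid] == value:
--             return mid
--         else:
--             lo = mid
--     return hi
--
-- def _lowerIndex(L, value):
--     # iterative binary search; returns the first component of A's indexFind
--     lo, hi = 0, len(L)
--     while lo + 1 != hi:
--         mid = (lo + hi) // 2
--         if value < L[mid]:
--             hi = mid
--         elif L[mid] == value:
--             return mid
--         else:
--             lo = mid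
--     return lo
-- ===== Notes on version B (the rewrite author's own statement) =====
-- stated objective: alternative
-- what changed: Replaces A's recursive pair-returning indexFind helper with two iterative single-valued binary-search loops (one per limit) replaying the same midpoint comparisons, and builds the result set from a list slice instead of a generator over an index range.
-- outside the precondition, e.g. on ingredientsInRange([], 0, 10): A raises IndexError, B raises IndexError
import Mathlib
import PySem

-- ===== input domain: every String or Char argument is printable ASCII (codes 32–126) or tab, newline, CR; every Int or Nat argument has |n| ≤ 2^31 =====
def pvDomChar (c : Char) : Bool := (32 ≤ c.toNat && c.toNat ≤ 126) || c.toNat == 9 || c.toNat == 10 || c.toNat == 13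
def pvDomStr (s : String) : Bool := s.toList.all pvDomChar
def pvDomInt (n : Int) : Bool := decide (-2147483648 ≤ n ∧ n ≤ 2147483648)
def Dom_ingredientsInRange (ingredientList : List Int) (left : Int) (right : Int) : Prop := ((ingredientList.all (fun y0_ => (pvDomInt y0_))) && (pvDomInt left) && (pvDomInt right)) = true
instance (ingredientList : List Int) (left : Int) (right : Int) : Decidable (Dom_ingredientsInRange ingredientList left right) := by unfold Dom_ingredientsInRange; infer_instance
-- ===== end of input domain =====

-- B replaces A's recursive pair-returning indexFind by two iterative single-valued
-- binary-search loops replaying the same midpoints, and builds the set from a slice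
-- instead of a generator over range (objective: alternative decomposition, same cost).

-- ===== PORT A =====
-- recursive helper indexFind; fuel bounds the recursion depth (at most the interval
-- size); the fuel-0 and index-error defaults are unreachable from ingredientsInRange.
def indexFindA (fuel : Nat) (l : List Int) (value lo hi : Int) : Int × Int :=
  match fuel with
  | 0 => (lo, hi)
  | fuel + 1 =>
    let middle := PySem.Int.floordiv (lo + hi) 2
    if lo + 1 = hi then (lo, hi)
    else
      match PySem.List.pyGet? l middle with
      | none => (lo, hi)   -- IndexError in Python; unreachable on the calls below
      | some x =>
        if value < x then indexFindA fuel l value lo middle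
        else if x = value then (middle, middle)
        else indexFindA fuel l value middle hi

def ingredientsInRange (ingredientList : List Int) (left : Int) (right : Int) : List Int :=
  -- pyGetD defaults are unreachable: Pre_ requires the list nonempty
  let left := max left (PySem.List.pyGetD ingredientList 0 0)
  let right := min right (PySem.List.pyGetD ingredientList (-1) 0)
  if left > right then PySem.Set.empty
  else
    let n : Int := (ingredientList.length : Int)
    let leftLimitIndex := (indexFindA ingredientList.length ingredientList left 0 n).2
    let rightLimitIndex := (indexFindA ingredientList.length ingredientList right 0 n).1
    (PySem.List.pyRange leftLimitIndex (rightLimitIndex + 1) 1).foldl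
      (fun s m => PySem.Set.add s (PySem.List.pyGetD ingredientList m 0)) PySem.Set.empty

-- ===== PORT B =====
-- iterative binary-search loop returning a single index; state (lo, hi), fuel = loop bound
def upperIndexB (fuel : Nat) (l : List Int) (value lo hi : Int) : Int :=
  match fuel with
  | 0 => hi
  | fuel + 1 =>
    if lo + 1 = hi then hi
    else
      let mid := PySem.Int.floordiv (lo + hi) 2
      match PySem.List.pyGet? l mid with
      | none => hi   -- IndexError in Python; unreachable on the calls below
      | some x =>
        if value < x then upperIndexB fuel l value lo mid
        else if x = value then mid
        else upperIndexB fuel l value mid hi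

def lowerIndexB (fuel : Nat) (l : List Int) (value lo hi : Int) : Int :=
  match fuel with
  | 0 => lo
  | fuel + 1 =>
    if lo + 1 = hi then lo
    else
      let mid := PySem.Int.floordiv (lo + hi) 2
      match PySem.List.pyGet? l mid with
      | none => lo   -- IndexError in Python; unreachable on the calls below
      | some x =>
        if value < x then lowerIndexB fuel l value lo mid
        else if x = value then mid
        else lowerIndexB fuel l value mid hi

def ingredientsInRange_alt (ingredientList : List Int) (left : Int) (right : Int) : List Int :=
  let left := max left (PySem.List.pyGetD ingredientList 0 0)
  let right := min right (PySem.List.pyGetD ingredientList (-1) 0)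
  if left > right then PySem.Set.empty
  else
    let i := upperIndexB ingredientList.length ingredientList left 0 (ingredientList.length : Int)
    let j := lowerIndexB ingredientList.length ingredientList right 0 (ingredientList.length : Int)
    PySem.Set.ofList (PySem.List.slice ingredientList (some i) (some (j + 1)))

-- ===== PRECONDITION & SPEC =====
-- A raises IndexError on the empty list (ingredientList[0]); excluded.
def Pre_ingredientsInRange (ingredientList : List Int) (left : Int) (right : Int) : Prop :=
  ingredientList ≠ []
instance (ingredientList : List Int) (left : Int) (right : Int) : Decidable (Pre_ingredientsInRange ingredientList left right) := by unfold Pre_ingredientsInRange; infer_instance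
def pvWitness_ingredientsInRange : List Int × Int × Int := ([1, 2, 3, 5], 2, 5)

def Spec_ingredientsInRange (ingredientList : List Int) (left : Int) (right : Int) (out : List Int) : Prop := out = ingredientsInRange_alt ingredientList left right
instance (ingredientList : List Int) (left : Int) (right : Int) (out : List Int) : Decidable (Spec_ingredientsInRange ingredientList left right out) := by unfold Spec_ingredientsInRange; infer_instance

-- ===== CLAIM (what is proved, stated in full; the proofs are below) =====
def Claim_equal_ingredientsInRange : Prop := ∀ (ingredientList : List Int) (left : Int) (right : Int), Dom_ingredientsInRange ingredientList left right → Pre_ingredientsInRange ingredientList left right → Spec_ingredientsInRange ingredientList left right (ingredientsInRange ingredientList left right)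

-- ===== LEMMAS AND PROOFS =====

-- the iterative loops compute exactly the two components of A's recursive indexFind
theorem upperIndexB_eq (fuel : Nat) (l : List Int) (value lo hi : Int) :
    upperIndexB fuel l value lo hi = (indexFindA fuel l value lo hi).2 := by
  induction fuel generalizing lo hi with
  | zero => rfl
  | succ f ih =>
    simp only [upperIndexB, indexFindA]
    split_ifs with h1
    · rfl
    · cases hx : PySem.List.pyGet? l (PySem.Int.floordiv (lo + hi) 2) with
      | none => rfl
      | some x =>
        by_cases h2 : value < x <;> by_cases h3 : x = value <;> simp [h2, h3, ih]

theorem lowerIndexB_eq (fuel : Nat) (l : List Int) (value lo hi : Int) :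
    lowerIndexB fuel l value lo hi = (indexFindA fuel l value lo hi).1 := by
  induction fuel generalizing lo hi with
  | zero => rfl
  | succ f ih =>
    simp only [lowerIndexB, indexFindA]
    split_ifs with h1
    · rfl
    · cases hx : PySem.List.pyGet? l (PySem.Int.floordiv (lo + hi) 2) with
      | none => rfl
      | some x =>
        by_cases h2 : value < x <;> by_cases h3 : x = value <;> simp [h2, h3, ih]

-- bounds invariant of indexFindA on a valid interval
theorem indexFindA_bounds (fuel : Nat) (l : List Int) (value : Int) :
    ∀ lo hi : Int, 0 ≤ lo → lo < hi →
      lo ≤ (indexFindA fuel l value lo hi).1 ∧ (indexFindA fuel l value lo hi).1 < hi ∧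
      lo ≤ (indexFindA fuel l value lo hi).2 ∧ (indexFindA fuel l value lo hi).2 ≤ hi := by
  induction fuel with
  | zero => intro lo hi h0 hlt; simp [indexFindA]; omega
  | succ f ih =>
    intro lo hi h0 hlt
    have hmid := PySem.Int.floordiv_two_mid_bounds (lo := lo) (hi := hi) (le_of_lt hlt)
    simp only [indexFindA]
    split_ifs with h1
    · simp; omega
    · have hmlo : lo < PySem.Int.floordiv (lo + hi) 2 := by
        have : lo + 2 ≤ hi := by omega
        have := PySem.Int.le_floordiv_iff_mul_le (q := lo + 1) (a := lo + hi) (b := 2) (by omega)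
        omega
      have hmhi : PySem.Int.floordiv (lo + hi) 2 < hi := by
        have : lo + 2 ≤ hi := by omega
        have := PySem.Int.floordiv_lt_iff_lt_mul (q := hi) (a := lo + hi) (b := 2) (by omega)
        omega
      cases hx : PySem.List.pyGet? l (PySem.Int.floordiv (lo + hi) 2) with
      | none => simp; omega
      | some x =>
        by_cases h2 : value < x
        · simp only [h2, if_true]
          have := ih lo (PySem.Int.floordiv (lo + hi) 2) h0 hmlo
          omega
        · by_cases h3 : x = value
          · simp [h3]; omega
          · simp only [h2, h3, if_false]
            have := ih (PySem.Int.floordiv (lo + hi) 2) hi (by omega) hmhi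
            omega

-- a drop/take segment, elementwise
theorem drop_take_eq_map_range {α : Type} [Inhabited α] (l : List α) (a m : Nat)
    (h : a + m ≤ l.length) :
    (l.drop a).take m = (List.range m).map (fun k => l.getD (a + k) default) := by
  apply List.ext_getElem
  · simp; omega
  · intro k hk1 hk2
    have hk : k < m := by simpa using hk2
    have hak : a + k < l.length := by omega
    simp [List.getD_eq_getElem?_getD, List.getElem?_eq_getElem hak]

-- A's set-comprehension over range(i, e) equals set(l[i:e])
theorem fold_range_eq_ofList_slice (l : List Int) (i e : Int)
    (hi0 : 0 ≤ i) (hil : i ≤ (l.length : Int)) (he0 : 0 ≤ e) (hel : e ≤ (l.length : Int)) :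
    (PySem.List.pyRange i e 1).foldl
      (fun s m => PySem.Set.add s (PySem.List.pyGetD l m 0)) PySem.Set.empty
    = PySem.Set.ofList (PySem.List.slice l (some i) (some e)) := by
  have hofl : PySem.Set.ofList (PySem.List.slice l (some i) (some e))
      = (PySem.List.slice l (some i) (some e)).foldl PySem.Set.add PySem.Set.empty :=
    PySem.Set.ofList_eq_foldl _
  rw [hofl]
  have hslice : PySem.List.slice l (some i) (some e)
      = (PySem.List.pyRange i e 1).map (fun m => PySem.List.pyGetD l m 0) := by
    rw [PySem.List.slice_toNat l hi0 he0, PySem.List.pyRange_one]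
    have hm : (e - i).toNat = e.toNat - i.toNat := by omega
    have hb : i.toNat + (e.toNat - i.toNat) ≤ l.length := by omega
    rw [hm, drop_take_eq_map_range l i.toNat (e.toNat - i.toNat) hb, List.map_map]
    apply List.map_congr_left
    intro k hk
    have hik : i + (k : Int) = ((i.toNat + k : Nat) : Int) := by omega
    simp only [Function.comp, hik, PySem.List.pyGetD_natCast]
    rfl
  rw [hslice, List.foldl_map]

-- ===== VERDICT (by name: the statement is the Claim_ definition above) =====
theorem ingredientsInRange_spec : Claim_equal_ingredientsInRange := by
  intro l left right _hdom hpre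
  unfold Spec_ingredientsInRange ingredientsInRange ingredientsInRange_alt
  simp only []
  set left' := max left (PySem.List.pyGetD l 0 0) with hl'
  set right' := min right (PySem.List.pyGetD l (-1) 0) with hr'
  by_cases hgt : left' > right'
  · simp [hgt]
  · simp only [hgt, if_false]
    have hlen : 0 < (l.length : Int) := by
      have : l.length ≠ 0 := by simpa [List.length_eq_zero_iff] using hpre
      omega
    have hbl := indexFindA_bounds l.length l left' 0 (l.length : Int) le_rfl hlen
    have hbr := indexFindA_bounds l.length l right' 0 (l.length : Int) le_rfl hlen
    rw [upperIndexB_eq, lowerIndexB_eq]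
    exact fold_range_eq_ofList_slice l _ _ (by omega) (by omega) (by omega) (by omega)
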